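-- pv_equiv track=rewrite | github.com/WojtowiczZuzanna/zadania | 12_py/mock1/p7.py | f
-- ===== SOURCE A (Python) =====
-- def f(arr2D):
--     row_count = len(arr2D)
--     column_count = len(arr2D[0]) if arr2D else 0
--
--     column_sums = []
--     for col in range(column_count):
--         column_sums.append(sum(arr2D[row][col] for row in range(row_count)))
--
--     for element in column_sums:
--         column_sums.remove(element)
--         if element in column_sums:
--             return True
--         else:
--             return False
-- ===== SOURCE B (Python) =====
-- def f(arr2D):
--     if not arr2D or not arr2D[0]:
--         return None
--     first = sum(row[0] for row in arr2D)
--     for col in range(1, len(arr2D[0])):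
--         if sum(row[col] for row in arr2D) == first:
--             return True
--     return False
-- ===== Notes on version B (the rewrite author's own statement) =====
-- stated objective: simpler
-- what changed: Instead of building the full list of all column sums and then doing remove-plus-membership, B computes the first column's sum once and scans the remaining columns one at a time, returning True as soon as one column's sum equals it (short-circuit, no intermediate list).
-- outside the precondition, e.g. on f([]): A returns None, B returns None; on f([[]]): A returns None, B returns None
import Mathlib
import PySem

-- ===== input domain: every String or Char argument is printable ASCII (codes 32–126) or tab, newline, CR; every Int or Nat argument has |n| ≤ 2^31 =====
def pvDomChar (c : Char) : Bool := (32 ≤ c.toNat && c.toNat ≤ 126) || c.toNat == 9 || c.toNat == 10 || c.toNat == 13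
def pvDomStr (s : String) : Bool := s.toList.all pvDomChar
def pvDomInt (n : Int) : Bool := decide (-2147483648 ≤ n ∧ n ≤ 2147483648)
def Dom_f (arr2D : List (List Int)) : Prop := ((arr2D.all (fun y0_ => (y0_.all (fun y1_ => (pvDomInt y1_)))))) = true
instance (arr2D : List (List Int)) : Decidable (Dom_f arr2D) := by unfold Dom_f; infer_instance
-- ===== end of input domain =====

-- B is a one-pass short-circuiting rewrite (first column's sum computed once, each later
-- column's sum compared on the fly) of A's build-all-column-sums-then-membership version;
-- objective: simpler, no speed claim.

-- ===== PORT A =====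
def f (arr2D : List (List Int)) : Bool :=
  let row_count : Int := (arr2D.length : Int)
  let column_count : Int := if arr2D ≠ [] then ((arr2D.headD []).length : Int) else 0
  let column_sums : List Int :=
    (PySem.List.pyRange 0 column_count 1).map (fun col =>
      ((PySem.List.pyRange 0 row_count 1).map (fun row =>
        PySem.List.pyGetD (PySem.List.pyGetD arr2D row []) col 0)).sum)
  -- Python's final loop removes the head and tests it against the remainder,
  -- returning on the first iteration; empty column_sums returns None (excluded by Pre_f).
  match column_sums with
  | [] => false
  | e :: rest => decide (e ∈ rest)

-- ===== PORT B =====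
def f_alt (arr2D : List (List Int)) : Bool :=
  if arr2D = [] ∨ arr2D.headD [] = [] then false  -- Python B returns None here (excluded by Pre_f)
  else
    let first : Int := (arr2D.map (fun row => PySem.List.pyGetD row 0 0)).sum
    (PySem.List.pyRange 1 ((arr2D.headD []).length : Int) 1).any (fun col =>
      (arr2D.map (fun row => PySem.List.pyGetD row col 0)).sum == first)

-- ===== PRECONDITION & SPEC =====
-- Pre_f excludes the inputs where A leaves the Bool type or raises: empty / zero-width
-- input (A falls off both loops and returns None) and ragged input with a row shorter
-- than the first row (A raises IndexError).
def Pre_f (arr2D : List (List Int)) : Prop :=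
  arr2D ≠ [] ∧ arr2D.headD [] ≠ [] ∧
  ∀ row ∈ arr2D, (arr2D.headD []).length ≤ row.length
instance (arr2D : List (List Int)) : Decidable (Pre_f arr2D) := by unfold Pre_f; infer_instance

def pvWitness_f : List (List Int) := [[1, 2, 1], [3, 0, 3]]

def Spec_f (arr2D : List (List Int)) (out : Bool) : Prop := out = f_alt arr2D
instance (arr2D : List (List Int)) (out : Bool) : Decidable (Spec_f arr2D out) := by unfold Spec_f; infer_instance

-- ===== CLAIM (what is proved, stated in full; the proofs are below) =====
def Claim_equal_f : Prop := ∀ (arr2D : List (List Int)), Dom_f arr2D → Pre_f arr2D → Spec_f arr2D (f arr2D)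

-- ===== LEMMAS AND PROOFS =====

-- A's inner index loop over the rows computes the same list as B's direct map over the rows.
lemma map_rows (arr2D : List (List Int)) (col : Int) :
    (PySem.List.pyRange 0 (arr2D.length : Int) 1).map
      (fun row => PySem.List.pyGetD (PySem.List.pyGetD arr2D row []) col 0)
      = arr2D.map (fun row => PySem.List.pyGetD row col 0) := by
  have h := PySem.List.map_pyGetD_pyRange_zero' (xs := arr2D) (d := ([] : List Int))
  calc (PySem.List.pyRange 0 (arr2D.length : Int) 1).map
        (fun row => PySem.List.pyGetD (PySem.List.pyGetD arr2D row []) col 0)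
      = ((PySem.List.pyRange 0 (arr2D.length : Int) 1).map
          (fun row => PySem.List.pyGetD arr2D row [])).map
          (fun row => PySem.List.pyGetD row col 0) := by rw [List.map_map]; rfl
    _ = arr2D.map (fun row => PySem.List.pyGetD row col 0) := by rw [h]

-- A reduces to: "first column's sum is a member of the list of the later columns' sums".
lemma f_eq_mem (r0 : List Int) (rs : List (List Int)) (h : r0 ≠ []) :
    f (r0 :: rs) =
      decide ((((r0 :: rs).map (fun row => PySem.List.pyGetD row 0 0)).sum) ∈
        (PySem.List.pyRange 1 (r0.length : Int) 1).map
          (fun col => ((r0 :: rs).map (fun row => PySem.List.pyGetD row col 0)).sum)) := by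
  have hn : (0 : Int) < (r0.length : Int) := by
    have : r0.length ≠ 0 := fun hl => h (List.eq_nil_of_length_eq_zero hl)
    omega
  simp only [f, List.headD_cons, ne_eq, reduceCtorEq, not_false_eq_true, if_true]
  rw [PySem.List.pyRange_one_cons hn, List.map_cons]
  simp only [map_rows, zero_add]

-- B reduces to: "some later column's sum equals the first column's sum".
lemma f_alt_eq_any (r0 : List Int) (rs : List (List Int)) (h : r0 ≠ []) :
    f_alt (r0 :: rs) =
      (PySem.List.pyRange 1 (r0.length : Int) 1).any (fun col =>
        ((r0 :: rs).map (fun row => PySem.List.pyGetD row col 0)).sum ==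
        ((r0 :: rs).map (fun row => PySem.List.pyGetD row 0 0)).sum) := by
  simp only [f_alt, List.headD_cons]
  rw [if_neg (by simp [h])]

-- membership in a mapped list is the corresponding any over the index list
lemma mem_map_eq_any (l : List Int) (e : Int) (S : Int → Int) :
    decide (e ∈ l.map S) = l.any (fun c => S c == e) := by
  rw [Bool.eq_iff_iff]
  simp only [decide_eq_true_eq, List.any_eq_true, List.mem_map, beq_iff_eq]

-- ===== VERDICT (by name: the statement is the Claim_ definition above) =====
theorem f_spec : Claim_equal_f := by
  intro arr2D _ hpre
  obtain ⟨hne, hhd, _⟩ := hpre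
  unfold Spec_f
  cases arr2D with
  | nil => exact absurd rfl hne
  | cons r0 rs =>
    simp only [List.headD_cons] at hhd
    rw [f_eq_mem r0 rs hhd, f_alt_eq_any r0 rs hhd, mem_map_eq_any]
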